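-- pv_equiv track=rewrite | github.com/ionesosa-e/e2e-decomposition | interface/charts/high_level_architecture_charts.py | build_hierarchy_from_fqns
-- ===== SOURCE A (Python) =====
-- def build_hierarchy_from_fqns(fqns):
--     """Build labels, parents, values, and text for go.Treemap / go.Icicle from a list of fqns.
--
--     Returns (labels, parents, values, text) where:
--     - labels: Full FQN paths for uniqueness (e.g., "com.encora.spark.model")
--     - parents: Full FQN paths of parent nodes (e.g., "com.encora.spark")
--     - values: Aggregated counts bottom-up
--     - text: Short display names (e.g., "model")
--     """
--     def prefixes(fqn):
--         """Generate all prefixes of an FQN."""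
--         parts = [p for p in str(fqn).split('.') if p]
--         acc = []
--         for p in parts:
--             acc.append(p if not acc else acc[-1] + '.' + p)
--         return acc
--
--     nodes = set()
--     for f in fqns:
--         s = str(f).strip()
--         if not s or s == 'nan':
--             continue
--         for pref in prefixes(s):
--             nodes.add(pref)
--
--     if not nodes:
--         return [], [], [], []
--
--     leaf_counter = {}
--     for f in fqns:
--         s = str(f).strip()
--         if not s or s == 'nan':
--             continue
--         leaf_counter[s] = leaf_counter.get(s, 0) + 1
--
--     node_values = {}
--     for node in sorted(nodes, key=lambda s: (-s.count('.'), s)):  # Process deepest first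
--         if node in leaf_counter:
--             node_values[node] = leaf_counter[node]
--         else:
--             # Sum all direct children
--             child_sum = 0
--             for other_node in nodes:
--                 if other_node.startswith(node + '.') and other_node.count('.') == node.count('.') + 1:
--                     child_sum += node_values.get(other_node, 0)
--             node_values[node] = child_sum
--
--     labels, parents, values, text = [], [], [], []
--     for node in sorted(nodes, key=lambda s: (s.count('.'), s)):
--         # Use full FQN as label for uniqueness
--         label = node
--
--         if '.' in node:
--             parent_fqn = node.rsplit('.', 1)[0]
--         else:
--             parent_fqn = ""
--
--         short_name = node.split('.')[-1]
--
--         labels.append(label)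
--         parents.append(parent_fqn)
--         values.append(node_values.get(node, 1))  # Ensure at least 1
--         text.append(short_name)
--
--     return labels, parents, values, text
-- ===== SOURCE B (Python) =====
-- def build_hierarchy_from_fqns(fqns):
--     """One-pass index; values aggregated bottom-up via a child-sum dict keyed by the rsplit parent."""
--     nodes = set()
--     leaf_counter = {}
--     for f in fqns:
--         s = str(f).strip()
--         if not s or s == 'nan':
--             continue
--         leaf_counter[s] = leaf_counter.get(s, 0) + 1
--         acc = ''
--         for p in str(s).split('.'):
--             if not p:
--                 continue
--             acc = p if not acc else acc + '.' + p
--             nodes.add(acc)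
--
--     if not nodes:
--         return [], [], [], []
--
--     node_values = {}
--     child_sum = {}
--     for node in sorted(nodes, key=lambda s: (-s.count('.'), s)):  # deepest first
--         v = leaf_counter[node] if node in leaf_counter else child_sum.get(node, 0)
--         node_values[node] = v
--         if '.' in node:
--             parent = node.rsplit('.', 1)[0]
--             child_sum[parent] = child_sum.get(parent, 0) + v
--
--     ordered = sorted(nodes, key=lambda s: (s.count('.'), s))
--     labels = list(ordered)
--     parents = [n.rsplit('.', 1)[0] if '.' in n else '' for n in ordered]
--     values = [node_values.get(n, 0) for n in ordered]
--     text = [n.split('.')[-1] for n in ordered]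
--     return labels, parents, values, text
-- ===== Notes on version B (the rewrite author's own statement) =====
-- stated objective: alternative
-- what changed: B builds the node set and leaf counter in a single pass and replaces A's per-node scan of the whole node set (summing direct children) by a bottom-up one-pass aggregation that adds each node's value into a child-sum dict keyed by its rsplit('.',1)[0] parent, so no inner scan over the node set remains.
import Mathlib
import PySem

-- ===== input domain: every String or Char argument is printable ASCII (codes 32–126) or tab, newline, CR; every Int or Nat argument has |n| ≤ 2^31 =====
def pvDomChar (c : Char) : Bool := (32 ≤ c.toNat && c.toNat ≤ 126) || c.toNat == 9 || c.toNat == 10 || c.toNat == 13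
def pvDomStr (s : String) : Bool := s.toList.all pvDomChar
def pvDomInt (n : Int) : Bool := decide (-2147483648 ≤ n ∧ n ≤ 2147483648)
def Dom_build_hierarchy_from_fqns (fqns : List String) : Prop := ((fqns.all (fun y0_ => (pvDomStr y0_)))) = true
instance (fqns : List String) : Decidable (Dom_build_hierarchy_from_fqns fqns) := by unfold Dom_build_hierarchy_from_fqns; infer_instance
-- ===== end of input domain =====

-- B builds the node index in one pass and aggregates values bottom-up via a child-sum dict keyed by the rsplit parent, instead of A's per-node scan of the whole node set; same return value.

-- ---- helpers shared by both ports (identical Python text in both programs) ----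

-- s = str(f).strip()
def pvClean (f : String) : List Char := PySem.Chars.strip f.toList

-- 'if not s or s == "nan"'
def pvSkip (s : List Char) : Bool := s.isEmpty || s == "nan".toList

-- s.rsplit('.', 1)[0]; hand port (PySem has no rsplit with maxsplit): drop the last
-- '.'-component; exact whenever '.' ∈ s, and both Pythons only call it under "'.' in node"
def pvRsplitParent (c : List Char) : List Char :=
  ((c.reverse.dropWhile (fun ch => ch != '.')).drop 1).reverse

-- s.split('.')[-1]; split('.') is never empty, so [-1] never raises and the default is dead
def pvLastComp (c : List Char) : List Char :=
  PySem.List.pyGetD (PySem.Chars.splitOn c ['.']) (-1) []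

-- key=lambda s: (-s.count('.'), s)
def pvKeyDesc (s : List Char) : Lex (Int × List Char) :=
  toLex (-(PySem.Chars.count s ['.'] : Int), s)

-- key=lambda s: (s.count('.'), s)
def pvKeyAsc (s : List Char) : Lex (Int × List Char) :=
  toLex ((PySem.Chars.count s ['.'] : Int), s)

-- ===== PORT A =====

-- prefixes(fqn): parts = [p for p in str(fqn).split('.') if p]; acc list loop (acc[-1] is
-- guarded by 'if not acc', so the pyGetD default is dead)
def pvPrefixesA (s : List Char) : List (List Char) :=
  ((PySem.Chars.splitOn s ['.']).filter (fun p => !p.isEmpty)).foldl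
    (fun acc p => acc ++ [if acc.isEmpty then p else PySem.List.pyGetD acc (-1) [] ++ '.' :: p]) []

-- first loop: nodes = set(); for f in fqns: … for pref in prefixes(s): nodes.add(pref)
def pvNodesA (fqns : List String) : PySem.Set (List Char) :=
  fqns.foldl (fun nodes f =>
    let s := pvClean f
    if pvSkip s then nodes
    else (pvPrefixesA s).foldl (fun ns pref => PySem.Set.add ns pref) nodes) []

-- second loop: leaf_counter[s] = leaf_counter.get(s, 0) + 1
def pvLeafA (fqns : List String) : PySem.Dict (List Char) Int :=
  fqns.foldl (fun d f =>
    let s := pvClean f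
    if pvSkip s then d
    else d.insert s (d.getD s 0 + 1)) PySem.Dict.empty

-- other_node.startswith(node + '.') and other_node.count('.') == node.count('.') + 1
def pvChildCond (node other : List Char) : Bool :=
  PySem.Chars.startswith other (node ++ ['.']) &&
    (PySem.Chars.count other ['.'] == PySem.Chars.count node ['.'] + 1)

-- one iteration of the node_values loop ('node in leaf_counter' then leaf_counter[node],
-- ported as contains + getD under the guard; else the inner child scan over the whole set)
def pvStepA (nodes : PySem.Set (List Char)) (leaf : PySem.Dict (List Char) Int)
    (nv : PySem.Dict (List Char) Int) (node : List Char) : PySem.Dict (List Char) Int :=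
  if leaf.contains node then nv.insert node (leaf.getD node 0)
  else nv.insert node
    (nodes.foldl (fun cs other => if pvChildCond node other then cs + nv.getD other 0 else cs) 0)

def pvValuesA (nodes : PySem.Set (List Char)) (leaf : PySem.Dict (List Char) Int) :
    PySem.Dict (List Char) Int :=
  (PySem.List.sorted nodes pvKeyDesc).foldl (pvStepA nodes leaf) PySem.Dict.empty

def build_hierarchy_from_fqns (fqns : List String) :
    List String × List String × List Int × List String :=
  let nodes := pvNodesA fqns
  if nodes.isEmpty then ([], [], [], [])
  else
    let nv := pvValuesA nodes (pvLeafA fqns)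
    -- final loop: append label/parent/value/text per node, ascending (depth, name) order
    (PySem.List.sorted nodes pvKeyAsc).foldl (fun acc node =>
      (acc.1 ++ [String.ofList node],
       acc.2.1 ++ [String.ofList (if PySem.Chars.isIn ['.'] node then pvRsplitParent node else [])],
       acc.2.2.1 ++ [nv.getD node 1],
       acc.2.2.2 ++ [String.ofList (pvLastComp node)]))
      ([], [], [], [])

-- ===== PORT B =====

-- single pass: count the leaf and add every prefix (string accumulator acc) per fqn
def pvScanB (fqns : List String) : PySem.Set (List Char) × PySem.Dict (List Char) Int :=
  fqns.foldl (fun st f =>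
    let s := pvClean f
    if pvSkip s then st
    else
      let leaf := st.2.insert s (st.2.getD s 0 + 1)
      let inner := (PySem.Chars.splitOn s ['.']).foldl
        (fun (st2 : PySem.Set (List Char) × List Char) p =>
          if p.isEmpty then st2
          else
            let acc := if st2.2.isEmpty then p else st2.2 ++ '.' :: p
            (PySem.Set.add st2.1 acc, acc)) (st.1, [])
      (inner.1, leaf)) ([], PySem.Dict.empty)

-- one iteration of B's bottom-up loop: v = leaf_counter[node] if node in leaf_counter else
-- child_sum.get(node, 0); node_values[node] = v; child_sum[parent] += v
def pvStepB (leaf : PySem.Dict (List Char) Int)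
    (st : PySem.Dict (List Char) Int × PySem.Dict (List Char) Int) (node : List Char) :
    PySem.Dict (List Char) Int × PySem.Dict (List Char) Int :=
  let v := if leaf.contains node then leaf.getD node 0 else st.2.getD node 0
  let nv := st.1.insert node v
  if PySem.Chars.isIn ['.'] node then
    let parent := pvRsplitParent node
    (nv, st.2.insert parent (st.2.getD parent 0 + v))
  else (nv, st.2)

def pvValuesB (order : List (List Char)) (leaf : PySem.Dict (List Char) Int) :
    PySem.Dict (List Char) Int :=
  (order.foldl (pvStepB leaf) (PySem.Dict.empty, PySem.Dict.empty)).1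

def build_hierarchy_from_fqns_alt (fqns : List String) :
    List String × List String × List Int × List String :=
  let st := pvScanB fqns
  let nodes := st.1
  if nodes.isEmpty then ([], [], [], [])
  else
    let nv := pvValuesB (PySem.List.sorted nodes pvKeyDesc) st.2
    let ordered := PySem.List.sorted nodes pvKeyAsc
    (ordered.map (fun n => String.ofList n),
     ordered.map (fun n => String.ofList (if PySem.Chars.isIn ['.'] n then pvRsplitParent n else [])),
     ordered.map (fun n => nv.getD n 0),
     ordered.map (fun n => String.ofList (pvLastComp n)))

-- ===== PRECONDITION & SPEC =====
def Spec_build_hierarchy_from_fqns (fqns : List String) (out : List String × List String × List Int × List String) : Prop := out = build_hierarchy_from_fqns_alt fqns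
instance (fqns : List String) (out : List String × List String × List Int × List String) : Decidable (Spec_build_hierarchy_from_fqns fqns out) := by unfold Spec_build_hierarchy_from_fqns; infer_instance

-- ===== CLAIM (what is proved, stated in full; the proofs are below) =====
def Claim_equal_build_hierarchy_from_fqns : Prop := ∀ (fqns : List String), Dom_build_hierarchy_from_fqns fqns → Spec_build_hierarchy_from_fqns fqns (build_hierarchy_from_fqns fqns)

-- ===== LEMMAS AND PROOFS =====

-- count of a single character as a substring is List.count
lemma pv_count_go_singleton (ch : Char) :
    ∀ (fuel : Nat) (l : List Char) (acc : Nat), l.length ≤ fuel →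
      PySem.Chars.count.go [ch] fuel l acc = acc + l.count ch := by
  intro fuel
  induction fuel with
  | zero =>
    intro l acc h
    have : l = [] := List.eq_nil_of_length_eq_zero (Nat.le_zero.mp h)
    subst this; simp [PySem.Chars.count.go]
  | succ n ih =>
    intro l acc h
    cases l with
    | nil => simp [PySem.Chars.count.go]
    | cons x t =>
      simp only [PySem.Chars.count.go]
      by_cases hx : x = ch
      · subst hx
        have hp : [x].isPrefixOf (x :: t) = true := by simp [List.isPrefixOf]
        rw [if_pos hp]
        simp only [List.length_singleton, List.drop_one, List.tail_cons]
        rw [ih t (acc + 1) (by simpa using h)]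
        simp
        omega
      · have hp : ¬ ([ch].isPrefixOf (x :: t) = true) := by
          simp [List.isPrefixOf]
          exact fun hc => absurd hc.symm hx
        rw [if_neg hp]
        rw [ih t acc (by simpa using h)]
        simp [hx]

lemma pv_count_singleton (ch : Char) (l : List Char) :
    PySem.Chars.count l [ch] = l.count ch := by
  simp [PySem.Chars.count, pv_count_go_singleton ch l.length l 0 le_rfl]

-- "'.' in s" is membership of the character
lemma pv_isIn_dot (c : List Char) : PySem.Chars.isIn ['.'] c = true ↔ '.' ∈ c := by
  rw [PySem.Chars.isIn_iff_infix]
  constructor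
  · rintro ⟨s, t, rfl⟩; simp
  · intro h
    obtain ⟨s, t, rfl⟩ := List.append_of_mem h
    exact ⟨s, t, by simp⟩

-- rsplit on the last dot: recomposition and decomposition
lemma pv_rsplit_of_decomp (n t : List Char) (h : '.' ∉ t) :
    pvRsplitParent (n ++ '.' :: t) = n := by
  unfold pvRsplitParent
  have h1 : (n ++ '.' :: t).reverse = t.reverse ++ '.' :: n.reverse := by simp
  rw [h1]
  have h2 : t.reverse.dropWhile (fun ch => ch != '.') = [] := by
    rw [List.dropWhile_eq_nil_iff]
    intro x hx
    simp only [ne_eq, bne_iff_ne]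
    intro hc; subst hc; exact h (by simpa using hx)
  rw [List.dropWhile_append, h2]
  simp

lemma pv_rsplit_decomp (c : List Char) (h : '.' ∈ c) :
    ∃ t, c = pvRsplitParent c ++ '.' :: t ∧ '.' ∉ t := by
  have hrev : '.' ∈ c.reverse := by simpa using h
  have hd : c.reverse.dropWhile (fun ch => ch != '.') ≠ [] := by
    intro hnil
    rw [List.dropWhile_eq_nil_iff] at hnil
    have := hnil '.' hrev
    simp at this
  obtain ⟨x, v, hx⟩ := List.exists_cons_of_ne_nil hd
  have hx0 : x = '.' := by
    have := List.head_dropWhile_not (p := fun ch => ch != '.') hd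
    simp only [hx, List.head_cons] at this; simpa using this
  subst hx0
  have hsplit : c.reverse = c.reverse.takeWhile (fun ch => ch != '.') ++ '.' :: v := by
    conv_lhs => rw [← List.takeWhile_append_dropWhile (p := fun ch => ch != '.') (l := c.reverse)]
    rw [hx]
  refine ⟨(c.reverse.takeWhile (fun ch => ch != '.')).reverse, ?_, ?_⟩
  · have : c = v.reverse ++ '.' :: (c.reverse.takeWhile (fun ch => ch != '.')).reverse := by
      have := congrArg List.reverse hsplit
      simpa using this
    have hp : pvRsplitParent c = v.reverse := by
      unfold pvRsplitParent; rw [hx]; simp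
    rw [hp]; exact this
  · intro hmem
    have := List.mem_takeWhile_imp (by simpa using hmem)
    simp at this

-- the bridge: A's "startswith + one more dot" child condition is exactly "parent by rsplit"
lemma pv_childCond_iff (n c : List Char) :
    pvChildCond n c = true ↔ ('.' ∈ c ∧ pvRsplitParent c = n) := by
  unfold pvChildCond
  rw [Bool.and_eq_true, PySem.Chars.startswith_iff, beq_iff_eq,
    pv_count_singleton, pv_count_singleton]
  constructor
  · rintro ⟨⟨t, rfl⟩, hcnt⟩
    have hnt : '.' ∉ t := by
      rw [← List.count_eq_zero (a := '.')]
      simp [List.count_append] at hcnt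
      omega
    rw [List.append_assoc] at *
    refine ⟨by simp, ?_⟩
    simpa using pv_rsplit_of_decomp n t hnt
  · rintro ⟨hmem, rfl⟩
    obtain ⟨t, hc, hnt⟩ := pv_rsplit_decomp c hmem
    have hcnt : t.count '.' = 0 := List.count_eq_zero.mpr hnt
    constructor
    · refine ⟨t, ?_⟩
      conv_rhs => rw [hc]
      simp
    · conv_lhs => rw [hc]
      rw [List.count_append]
      simp [hcnt]

lemma pv_childCond_count (n c : List Char) (h : pvChildCond n c = true) :
    PySem.Chars.count c ['.'] = PySem.Chars.count n ['.'] + 1 := by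
  unfold pvChildCond at h
  rw [Bool.and_eq_true, beq_iff_eq] at h
  exact h.2

-- the nodes set is duplicate-free
lemma pv_add_fold_nodup (l : List (List Char)) :
    ∀ ns : PySem.Set (List Char), ns.Nodup → (l.foldl PySem.Set.add ns).Nodup := by
  induction l with
  | nil => intro ns h; exact h
  | cons x t ih => intro ns h; exact ih _ (PySem.Set.nodup_add ns x h)

lemma pv_nodesA_nodup (fqns : List String) : (pvNodesA fqns).Nodup := by
  suffices h : ∀ (l : List String) (ns : PySem.Set (List Char)), ns.Nodup →
      (l.foldl (fun nodes f =>
        let s := pvClean f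
        if pvSkip s then nodes
        else (pvPrefixesA s).foldl (fun ns pref => PySem.Set.add ns pref) nodes) ns).Nodup by
    exact h fqns [] List.nodup_nil
  intro l
  induction l with
  | nil => intro ns h; exact h
  | cons f fs ih =>
    intro ns h
    simp only [List.foldl_cons]
    by_cases hs : pvSkip (pvClean f) = true
    · simp only [hs, if_true]; exact ih ns h
    · simp only [hs, Bool.false_eq_true, if_false]
      exact ih _ (pv_add_fold_nodup _ ns h)

-- scan fission: B's single pass builds exactly A's nodes set and A's leaf counter
def pvChain : List Char → List (List Char) → List (List Char)
  | _, [] => []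
  | c, p :: ps =>
    (if c.isEmpty then p else c ++ '.' :: p) :: pvChain (if c.isEmpty then p else c ++ '.' :: p) ps

lemma pv_chainA :
    ∀ (parts : List (List Char)) (accA : List (List Char)) (c : List Char),
      (∀ p ∈ parts, p ≠ []) →
      ((accA = [] ∧ c = []) ∨ (accA ≠ [] ∧ accA.getLast? = some c ∧ c ≠ [])) →
      parts.foldl (fun acc p =>
          acc ++ [if acc.isEmpty then p else PySem.List.pyGetD acc (-1) [] ++ '.' :: p]) accA
        = accA ++ pvChain c parts := by
  intro parts
  induction parts with
  | nil => intro accA c _ _; simp [pvChain]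
  | cons p ps ih =>
    intro accA c hp hinv
    have hpne : p ≠ [] := hp p (by simp)
    have hstep : (if accA.isEmpty then p else PySem.List.pyGetD accA (-1) [] ++ '.' :: p)
        = (if c.isEmpty then p else c ++ '.' :: p) := by
      rcases hinv with ⟨h1, h2⟩ | ⟨h1, h2, h3⟩
      · subst h1; subst h2; simp
      · have hne : accA.isEmpty = false := by simpa [List.isEmpty_iff] using h1
        have hce : c.isEmpty = false := by simpa [List.isEmpty_iff] using h3
        rw [hne, hce]
        simp only [Bool.false_eq_true, if_false]
        congr 1
        rw [PySem.List.pyGetD_neg_one accA [] h1]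
        rw [List.getLast?_eq_some_getLast h1] at h2
        exact Option.some_injective _ h2
    simp only [List.foldl_cons, hstep, pvChain]
    set q := (if c.isEmpty then p else c ++ '.' :: p) with hq
    have hqne : q ≠ [] := by
      rw [hq]; split
      · exact hpne
      · simp
    rw [ih (accA ++ [q]) q (fun r hr => hp r (by simp [hr]))
        (Or.inr ⟨by simp, by simp, hqne⟩)]
    simp

lemma pv_chainB :
    ∀ (parts : List (List Char)) (ns : PySem.Set (List Char)) (c : List Char),
      parts.foldl (fun (st2 : PySem.Set (List Char) × List Char) p =>
          let acc := if st2.2.isEmpty then p else st2.2 ++ '.' :: p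
          (PySem.Set.add st2.1 acc, acc)) (ns, c)
        = ((pvChain c parts).foldl PySem.Set.add ns, (pvChain c parts).getLastD c) := by
  intro parts
  induction parts with
  | nil => intro ns c; simp [pvChain]
  | cons p ps ih =>
    intro ns c
    simp only [List.foldl_cons, pvChain]
    rw [ih]
    simp only [List.getLastD_cons]

lemma pv_scanB_eq (fqns : List String) : pvScanB fqns = (pvNodesA fqns, pvLeafA fqns) := by
  suffices h : ∀ (l : List String) (ns : PySem.Set (List Char)) (d : PySem.Dict (List Char) Int),
      l.foldl (fun st f =>
        let s := pvClean f
        if pvSkip s then st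
        else
          let leaf := st.2.insert s (st.2.getD s 0 + 1)
          let inner := (PySem.Chars.splitOn s ['.']).foldl
            (fun (st2 : PySem.Set (List Char) × List Char) p =>
              if p.isEmpty then st2
              else
                let acc := if st2.2.isEmpty then p else st2.2 ++ '.' :: p
                (PySem.Set.add st2.1 acc, acc)) (st.1, [])
          (inner.1, leaf)) (ns, d)
        = (l.foldl (fun nodes f =>
            let s := pvClean f
            if pvSkip s then nodes
            else (pvPrefixesA s).foldl (fun ns pref => PySem.Set.add ns pref) nodes) ns,
           l.foldl (fun d f =>
            let s := pvClean f
            if pvSkip s then d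
            else d.insert s (d.getD s 0 + 1)) d) by
    exact h fqns [] PySem.Dict.empty
  intro l
  induction l with
  | nil => intro ns d; simp
  | cons f fs ih =>
    intro ns d
    simp only [List.foldl_cons]
    by_cases hs : pvSkip (pvClean f) = true
    · simp only [hs, if_true]; exact ih ns d
    · simp only [hs, if_false, Bool.false_eq_true]
      have hfil : ((PySem.Chars.splitOn (pvClean f) ['.']).foldl
            (fun (st2 : PySem.Set (List Char) × List Char) p =>
              if p.isEmpty then st2
              else
                let acc := if st2.2.isEmpty then p else st2.2 ++ '.' :: p
                (PySem.Set.add st2.1 acc, acc)) (ns, []))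
          = (((PySem.Chars.splitOn (pvClean f) ['.']).filter (fun p => !p.isEmpty)).foldl
              (fun (st2 : PySem.Set (List Char) × List Char) p =>
                let acc := if st2.2.isEmpty then p else st2.2 ++ '.' :: p
                (PySem.Set.add st2.1 acc, acc)) (ns, [])) := by
        rw [List.foldl_filter]
        congr 1
        funext st2 p
        cases hpe : p.isEmpty <;> simp
      rw [hfil, pv_chainB]
      have hpref : pvPrefixesA (pvClean f)
          = pvChain [] ((PySem.Chars.splitOn (pvClean f) ['.']).filter (fun p => !p.isEmpty)) := by
        unfold pvPrefixesA
        rw [pv_chainA _ [] [] (fun p hp => by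
            have := List.of_mem_filter hp
            simpa [List.isEmpty_iff] using this) (Or.inl ⟨rfl, rfl⟩)]
        simp
      rw [← hpref]
      exact ih _ _

-- guarded fold-sum is the sum over the filtered list
lemma pv_foldl_if_add {β : Type} (l : List β) (p : β → Bool) (f : β → Int) :
    l.foldl (fun a x => if p x then a + f x else a) 0 = ((l.filter p).map f).sum := by
  have h : (l.filter p).foldl (fun a x => a + f x) 0
      = l.foldl (fun a x => if p x then a + f x else a) 0 := List.foldl_filter
  rw [← h, PySem.List.foldl_add]
  simp

-- the main loop correspondence, as a fold invariant: A's per-node child scan over the whole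
-- node set equals B's accumulated child sum, because all children are strictly deeper and
-- hence already processed in the (-depth, name) order
lemma pv_values_aux (nodes : PySem.Set (List Char)) (leaf : PySem.Dict (List Char) Int)
    (hnd : nodes.Nodup) :
    ∀ (rest done : List (List Char)) (nv cs : PySem.Dict (List Char) Int),
      done ++ rest = PySem.List.sorted nodes pvKeyDesc →
      (∀ c, ((nv.get? c).isSome = true) ↔ c ∈ done) →
      (∀ n, cs.getD n 0
          = ((done.filter (fun c => pvChildCond n c)).map (fun c => nv.getD c 0)).sum) →
      rest.foldl (pvStepA nodes leaf) nv = (rest.foldl (pvStepB leaf) (nv, cs)).1 ∧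
      (∀ c, (((rest.foldl (pvStepA nodes leaf) nv).get? c).isSome = true) ↔ c ∈ done ++ rest) := by
  have hperm : (PySem.List.sorted nodes pvKeyDesc).Perm nodes :=
    PySem.List.sorted_perm nodes pvKeyDesc false
  have hOnd : (PySem.List.sorted nodes pvKeyDesc).Nodup := hperm.nodup_iff.mpr hnd
  have hpair : (PySem.List.sorted nodes pvKeyDesc).Pairwise (fun a b => pvKeyDesc a ≤ pvKeyDesc b) :=
    PySem.List.sorted_pairwise nodes pvKeyDesc
  intro rest
  induction rest with
  | nil =>
    intro done nv cs _ hsome _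
    exact ⟨rfl, by simpa using hsome⟩
  | cons node rest' ih =>
    intro done nv cs hOeq hsome hcs
    have hndO : (done ++ node :: rest').Nodup := by rw [hOeq]; exact hOnd
    have hdnd : done.Nodup := hndO.of_append_left
    have hnode_done : node ∉ done := by
      rw [List.nodup_append] at hndO
      intro hmem
      exact hndO.2.2 node hmem node (by simp) rfl
    have hpairO : (done ++ node :: rest').Pairwise (fun a b => pvKeyDesc a ≤ pvKeyDesc b) := by
      rw [hOeq]; exact hpair
    have hrest_le : ∀ c ∈ rest', pvKeyDesc node ≤ pvKeyDesc c := by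
      have := (List.pairwise_append.mp hpairO).2.1
      exact (List.pairwise_cons.mp this).1
    have hval : (if leaf.contains node then leaf.getD node 0
          else nodes.foldl (fun cs other =>
            if pvChildCond node other then cs + nv.getD other 0 else cs) 0)
        = (if leaf.contains node then leaf.getD node 0 else cs.getD node 0) := by
      by_cases hlc : leaf.contains node = true
      · simp [hlc]
      · simp only [hlc, Bool.false_eq_true, if_false]
        rw [pv_foldl_if_add, hcs node]
        have hmemiff : ∀ c, c ∈ nodes.filter (fun c => pvChildCond node c)
            ↔ c ∈ done.filter (fun c => pvChildCond node c) := by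
          intro c
          simp only [List.mem_filter]
          constructor
          · rintro ⟨hcn, hcc⟩
            refine ⟨?_, hcc⟩
            have hcO : c ∈ done ++ node :: rest' := by
              rw [hOeq]; exact (PySem.List.mem_sorted nodes pvKeyDesc false c).mpr hcn
            rcases List.mem_append.mp hcO with h | h
            · exact h
            · exfalso
              have hcnt := pv_childCond_count node c hcc
              rcases List.mem_cons.mp h with rfl | h
              · omega
              · have hle := hrest_le c h
                unfold pvKeyDesc at hle
                rw [Prod.Lex.le_iff] at hle
                simp only [ofLex_toLex] at hle
                rcases hle with hlt | ⟨heq, _⟩ <;> omega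
          · rintro ⟨hcd, hcc⟩
            refine ⟨?_, hcc⟩
            have : c ∈ done ++ node :: rest' := List.mem_append.mpr (Or.inl hcd)
            rw [hOeq] at this
            exact (PySem.List.mem_sorted nodes pvKeyDesc false c).mp this
        have hpf : (nodes.filter (fun c => pvChildCond node c)).Perm
            (done.filter (fun c => pvChildCond node c)) :=
          (List.perm_ext_iff_of_nodup (hnd.filter _) (hdnd.filter _)).mpr hmemiff
        exact (hpf.map fun c => nv.getD c 0).sum_eq
    simp only [List.foldl_cons]
    have hstepA : pvStepA nodes leaf nv node
        = nv.insert node (if leaf.contains node then leaf.getD node 0 else cs.getD node 0) := by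
      unfold pvStepA
      by_cases hlc : leaf.contains node = true
      · simp [hlc]
      · have hv2 := hval
        simp only [hlc, Bool.false_eq_true, if_false] at hv2
        simp only [hlc, Bool.false_eq_true, if_false, hv2]
    set v := (if leaf.contains node then leaf.getD node 0 else cs.getD node 0) with hv
    have hstepBfull : pvStepB leaf (nv, cs) node
        = (nv.insert node v,
           if PySem.Chars.isIn ['.'] node then
             cs.insert (pvRsplitParent node) (cs.getD (pvRsplitParent node) 0 + v) else cs) := by
      unfold pvStepB
      by_cases hdot : PySem.Chars.isIn ['.'] node = true <;> simp [hdot, ← hv]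
    have hsome' : ∀ c, (((nv.insert node v).get? c).isSome = true) ↔ c ∈ done ++ [node] := by
      intro c
      by_cases hc : c = node
      · subst hc; simp [PySem.Dict.get?_insert_self]
      · rw [PySem.Dict.get?_insert_of_ne nv v hc]
        simp [hsome c, hc]
    have hmapc : ∀ P : List Char → Bool,
        (done.filter P).map (fun c => (nv.insert node v).getD c 0)
          = (done.filter P).map (fun c => nv.getD c 0) := by
      intro P
      apply List.map_congr_left
      intro c hc
      have hcd : c ∈ done := (List.mem_filter.mp hc).1
      have hne : c ≠ node := fun h => hnode_done (h ▸ hcd)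
      unfold PySem.Dict.getD
      rw [PySem.Dict.get?_insert_of_ne nv v hne]
    have hfilter_app : ∀ P : List Char → Bool, (done ++ [node]).filter P
        = done.filter P ++ if P node then [node] else [] := by
      intro P
      rw [List.filter_append]
      congr 1
      cases h : P node <;> simp [h]
    have hcs' : ∀ n, (if PySem.Chars.isIn ['.'] node then
          cs.insert (pvRsplitParent node) (cs.getD (pvRsplitParent node) 0 + v) else cs).getD n 0
        = (((done ++ [node]).filter (fun c => pvChildCond n c)).map
            (fun c => (nv.insert node v).getD c 0)).sum := by
      intro n
      have hgetv : (nv.insert node v).getD node 0 = v := by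
        unfold PySem.Dict.getD
        rw [PySem.Dict.get?_insert_self]
        rfl
      rw [hfilter_app (fun c => pvChildCond n c), List.map_append, List.sum_append, hmapc]
      by_cases hdot : PySem.Chars.isIn ['.'] node = true
      · have hdotm : '.' ∈ node := (pv_isIn_dot node).mp hdot
        simp only [hdot, if_true]
        rw [PySem.Dict.getD_insert]
        by_cases hn : n = pvRsplitParent node
        · subst hn
          have hPnode : pvChildCond (pvRsplitParent node) node = true :=
            (pv_childCond_iff _ _).mpr ⟨hdotm, rfl⟩
          rw [if_pos rfl, hPnode, if_pos rfl, hcs]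
          simp [hgetv]
        · have hPnode : pvChildCond n node = false := by
            rw [Bool.eq_false_iff]
            intro hP
            exact hn ((pv_childCond_iff n node).mp hP).2.symm
          rw [if_neg hn, hPnode, hcs n]
          simp
      · simp only [hdot, Bool.false_eq_true, if_false]
        have hPnode : pvChildCond n node = false := by
          rw [Bool.eq_false_iff]
          intro hP
          exact hdot ((pv_isIn_dot node).mpr ((pv_childCond_iff n node).mp hP).1)
        rw [hPnode, hcs n]
        simp
    obtain ⟨h1, h2⟩ := ih (done ++ [node]) (nv.insert node v)
        (if PySem.Chars.isIn ['.'] node then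
          cs.insert (pvRsplitParent node) (cs.getD (pvRsplitParent node) 0 + v) else cs)
        (by rw [← hOeq]; simp) hsome' hcs'
    constructor
    · rw [hstepA, hstepBfull]
      exact h1
    · intro c
      rw [hstepA]
      simpa using h2 c

lemma pv_values_eq (nodes : PySem.Set (List Char)) (leaf : PySem.Dict (List Char) Int)
    (hnd : nodes.Nodup) :
    pvValuesA nodes leaf = pvValuesB (PySem.List.sorted nodes pvKeyDesc) leaf ∧
    (∀ c, (((pvValuesA nodes leaf).get? c).isSome = true) ↔ c ∈ nodes) := by
  obtain ⟨h1, h2⟩ := pv_values_aux nodes leaf hnd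
      (PySem.List.sorted nodes pvKeyDesc) [] PySem.Dict.empty PySem.Dict.empty
      (by simp)
      (by intro c; simp [PySem.Dict.get?_empty])
      (by intro n; simp [PySem.Dict.getD, PySem.Dict.get?_empty])
  refine ⟨h1, fun c => ?_⟩
  rw [pvValuesA]
  rw [h2 c]
  simp [PySem.List.mem_sorted]

-- the quadruple-accumulator output loop is four maps
lemma pv_quad_foldl {α : Type} (l : List α) (f1 f2 : α → String) (f3 : α → Int) (f4 : α → String) :
    ∀ (a b : List String) (c : List Int) (d : List String),
    l.foldl (fun acc x =>
        (acc.1 ++ [f1 x], acc.2.1 ++ [f2 x], acc.2.2.1 ++ [f3 x], acc.2.2.2 ++ [f4 x]))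
      (a, b, c, d) =
      (a ++ l.map f1, b ++ l.map f2, c ++ l.map f3, d ++ l.map f4) := by
  induction l with
  | nil => intro a b c d; simp
  | cons x t ih => intro a b c d; simp [ih]

-- ===== VERDICT (by name: the statement is the Claim_ definition above) =====
theorem build_hierarchy_from_fqns_spec : Claim_equal_build_hierarchy_from_fqns := by
  intro fqns _
  unfold Spec_build_hierarchy_from_fqns
  unfold build_hierarchy_from_fqns build_hierarchy_from_fqns_alt
  rw [pv_scanB_eq fqns]
  set nodes := pvNodesA fqns with hnodes
  have hnd : nodes.Nodup := pv_nodesA_nodup fqns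
  obtain ⟨hveq, hmemv⟩ := pv_values_eq nodes (pvLeafA fqns) hnd
  by_cases h : nodes.isEmpty
  · simp [h]
  · simp only [h, Bool.false_eq_true, if_false]
    rw [← hveq]
    rw [pv_quad_foldl]
    simp only [List.nil_append]
    refine congrArg₂ _ rfl (congrArg₂ _ rfl (congrArg₂ _ ?_ rfl))
    apply List.map_congr_left
    intro n hmem
    have hn : n ∈ nodes := (PySem.List.mem_sorted nodes pvKeyAsc false n).mp hmem
    have := (hmemv n).mpr hn
    unfold PySem.Dict.getD
    cases hg : (pvValuesA nodes (pvLeafA fqns)).get? n with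
    | none => rw [hg] at this; simp at this
    | some w => simp
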